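-- pv_equiv track=rewrite | github.com/UberMetroid/chrono-mcp | scripts/ct_decompress.py | decode_ct_text
-- ===== SOURCE A (Python) =====
-- def decode_ct_text(compressed_data):
--     """Decode Chrono Trigger's text encoding"""
--     if not compressed_data:
--         return ""
--
--     result = []
--     i = 0
--     while i < len(compressed_data):
--         b = compressed_data[i]
--
--         if b == 0x00:
--             break  # End of string
--         elif b == 0x01:
--             result.append('\n')
--         elif b == 0x02:
--             result.append(' ')
--         elif 0x10 <= b <= 0x19:
--             # Number
--             result.append(f'#{b-0x0F}')
--         elif 0x1A <= b <= 0x23: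
--             # Control codes
--             result.append(f'[{b:02X}]')
--         elif 0x30 <= b <= 0x7E:
--             # ASCII-like range
--             result.append(chr(b))
--         elif 0x80 <= b <= 0x9F:
--             # Extended Katakana
--             result.append(f'[{b:02X}]')
--         elif 0xA0 <= b <= 0xDF:
--             # More Katakana
--             result.append(f'[{b:02X}]')
--         elif 0xE0 <= b <= 0xFF:
--             # Kanji or special
--             if b == 0xE0:
--                 result.append(' ')
--             else:
--                 result.append(f'[{b:02X}]')
--         else:
--             result.append(f'[{b:02X}]')
--
--         i += 1
--
--     return ''.join(result)
-- ===== SOURCE B (Python) =====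
-- # Staged chunk decoder: truncate at the 0x00 terminator first, then group consecutive
-- # ASCII-range bytes and decode each whole run at once via bytes().decode; only the
-- # sparse special bytes are formatted one at a time.
--
-- def _special(b):
--     if b == 0x01:
--         return '\n'
--     if b == 0x02 or b == 0xE0:
--         return ' '
--     if 0x10 <= b <= 0x19:
--         return '#%d' % (b - 0x0F)
--     return '[%02X]' % b
--
--
-- def decode_ct_text(compressed_data):
--     data = compressed_data
--     if 0 in data:
--         data = data[:data.index(0)]
--     n = len(data)
--     pieces = []
--     i = 0
--     while i < n:
--         b = data[i]
--         if 0x30 <= b <= 0x7E: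
--             j = i + 1
--             while j < n and 0x30 <= data[j] <= 0x7E:
--                 j += 1
--             pieces.append(bytes(data[i:j]).decode('ascii'))
--             i = j
--         else:
--             pieces.append(_special(b))
--             i += 1
--     return ''.join(pieces)
-- ===== Notes on version B (the rewrite author's own statement) =====
-- stated objective: alternative
-- what changed: Instead of A's single index-walk with break and a 10-way per-byte if/elif chain, B first truncates the list at the 0x00 terminator, then scans it in chunks: maximal runs of ASCII-range bytes are converted in one shot via bytes().decode('ascii'), and only the remaining special bytes are formatted individually.
import Mathlib
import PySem

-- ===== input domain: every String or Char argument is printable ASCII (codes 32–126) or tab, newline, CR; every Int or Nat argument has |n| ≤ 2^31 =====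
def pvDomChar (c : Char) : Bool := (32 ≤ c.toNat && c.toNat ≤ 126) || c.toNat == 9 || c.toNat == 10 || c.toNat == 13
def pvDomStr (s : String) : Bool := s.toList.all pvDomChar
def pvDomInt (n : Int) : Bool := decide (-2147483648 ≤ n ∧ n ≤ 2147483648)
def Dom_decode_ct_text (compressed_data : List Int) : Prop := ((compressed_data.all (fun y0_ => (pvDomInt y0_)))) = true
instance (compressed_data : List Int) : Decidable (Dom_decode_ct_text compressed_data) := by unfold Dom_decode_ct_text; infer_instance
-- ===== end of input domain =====

-- B truncates at the 0x00 terminator first, then decodes maximal ASCII-range runs in bulk and the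
-- sparse special bytes singly (objective: alternative structure, same asymptotic cost).
-- Strings are handled as List Char (the PySem representation), packed into a String at the final join.

-- shared helper: Python's f'{b:02X}' / '%02X' % b (uppercase hex, zero pad to width 2) — exact for all ints
def pvHexDigit (n : Nat) : Char := if n < 10 then Char.ofNat (48 + n) else Char.ofNat (55 + n)
def pvHexAux : Nat → Nat → List Char
  | 0, _ => []
  | f + 1, n => if n < 16 then [pvHexDigit n] else pvHexAux f (n / 16) ++ [pvHexDigit (n % 16)]
def pvFmt02XChars (b : Int) : List Char :=
  if b < 0 then '-' :: pvHexAux (b.natAbs + 1) b.natAbs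
  else if b < 16 then '0' :: pvHexAux (b.natAbs + 1) b.natAbs
  else pvHexAux (b.natAbs + 1) b.natAbs
-- Python's f'[{b:02X}]' / '[%02X]' % b
def pvBracketHex (b : Int) : List Char := '[' :: (pvFmt02XChars b ++ [']'])

-- ===== PORT A =====
-- the while loop: break on 0x00, append per the if/elif chain
def decodeCTLoop : List Int → List (List Char)
  | [] => []
  | b :: rest =>
    if b = 0 then []
    else
      (if b = 1 then ['\n']
       else if b = 2 then [' ']
       else if 16 ≤ b ∧ b ≤ 25 then '#' :: PySem.Int.toChars (b - 15)
       else if 26 ≤ b ∧ b ≤ 35 then pvBracketHex b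
       else if 48 ≤ b ∧ b ≤ 126 then [Char.ofNat b.toNat]
       else if 128 ≤ b ∧ b ≤ 159 then pvBracketHex b
       else if 160 ≤ b ∧ b ≤ 223 then pvBracketHex b
       else if 224 ≤ b ∧ b ≤ 255 then (if b = 224 then [' '] else pvBracketHex b)
       else pvBracketHex b) :: decodeCTLoop rest

def decode_ct_text (compressed_data : List Int) : String :=
  if compressed_data = [] then ""
  else String.ofList (PySem.Chars.join [] (decodeCTLoop compressed_data))

-- ===== PORT B =====
-- Source B's _special helper
def specialB (b : Int) : List Char :=
  if b = 1 then ['\n']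
  else if b = 2 ∨ b = 224 then [' ']
  else if 16 ≤ b ∧ b ≤ 25 then '#' :: PySem.Int.toChars (b - 15)
  else pvBracketHex b

-- 0x30 <= b <= 0x7E test
def asciiB (b : Int) : Bool := decide (48 ≤ b) && decide (b ≤ 126)

-- the chunk loop: the inner while that extends j over the ASCII run is the takeWhile,
-- and the slice data[i:j] / bytes().decode('ascii') is that run mapped to its characters
def chunkLoop : List Int → List (List Char)
  | [] => []
  | b :: rest =>
    if asciiB b then
      (((b :: rest).takeWhile asciiB).map (fun x => Char.ofNat x.toNat))
        :: chunkLoop ((b :: rest).dropWhile asciiB)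
    else specialB b :: chunkLoop rest
termination_by l => l.length
decreasing_by
  · simp only [List.dropWhile_cons, *]
    have := List.length_dropWhile_le asciiB rest
    simp at *; omega
  · simp

-- data[:data.index(0)] guarded by '0 in data' (take is exact: the index is a nonneg in-range Nat)
def truncZero (l : List Int) : List Int :=
  if l.contains 0 then l.take ((PySem.List.index? l 0).getD 0) else l

def decode_ct_text_alt (compressed_data : List Int) : String :=
  String.ofList (PySem.Chars.join [] (chunkLoop (truncZero compressed_data)))

-- ===== PRECONDITION & SPEC =====
def Spec_decode_ct_text (compressed_data : List Int) (out : String) : Prop := out = decode_ct_text_alt compressed_data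
instance (compressed_data : List Int) (out : String) : Decidable (Spec_decode_ct_text compressed_data out) := by unfold Spec_decode_ct_text; infer_instance

-- ===== CLAIM (what is proved, stated in full; the proofs are below) =====
def Claim_equal_decode_ct_text : Prop := ∀ (compressed_data : List Int), Dom_decode_ct_text compressed_data → Spec_decode_ct_text compressed_data (decode_ct_text compressed_data)

-- ===== LEMMAS AND PROOFS =====
-- A's per-byte chain, named for the proofs
def stepA (b : Int) : List Char :=
  if b = 1 then ['\n']
  else if b = 2 then [' ']
  else if 16 ≤ b ∧ b ≤ 25 then '#' :: PySem.Int.toChars (b - 15)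
  else if 26 ≤ b ∧ b ≤ 35 then pvBracketHex b
  else if 48 ≤ b ∧ b ≤ 126 then [Char.ofNat b.toNat]
  else if 128 ≤ b ∧ b ≤ 159 then pvBracketHex b
  else if 160 ≤ b ∧ b ≤ 223 then pvBracketHex b
  else if 224 ≤ b ∧ b ≤ 255 then (if b = 224 then [' '] else pvBracketHex b)
  else pvBracketHex b

-- B's per-byte value (what one byte contributes, ascii or special)
def stepB (b : Int) : List Char := if asciiB b then [Char.ofNat b.toNat] else specialB b

theorem stepA_eq_stepB (b : Int) : stepA b = stepB b := by
  unfold stepA stepB specialB asciiB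
  simp only [Bool.and_eq_true, decide_eq_true_eq]
  split_ifs <;> first | rfl | omega

theorem decodeCTLoop_eq (l : List Int) :
    decodeCTLoop l = (l.takeWhile (fun b => !(b == 0))).map stepA := by
  induction l with
  | nil => rfl
  | cons b r ih =>
    by_cases hb : b = 0
    · simp [decodeCTLoop, hb]
    · simp [decodeCTLoop, hb, ih]; rfl

theorem truncZero_eq (l : List Int) : truncZero l = l.takeWhile (fun b => !(b == 0)) := by
  induction l with
  | nil => rfl
  | cons b r ih =>
    by_cases hb : b = 0
    · subst hb
      unfold truncZero
      rw [PySem.List.index?_cons_self]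
      simp
    · unfold truncZero
      rw [PySem.List.index?_cons_of_ne r hb]
      by_cases hm : (0 : Int) ∈ r
      · obtain ⟨k, hk⟩ := Option.isSome_iff_exists.mp ((PySem.List.index?_isSome_iff r 0).mpr hm)
        have hc : (b :: r).contains 0 = true := by simp [hm]
        rw [if_pos hc, hk]
        simp only [Option.map_some, Option.getD_some, List.take_succ_cons]
        have h2 : List.takeWhile (fun b => !(b == 0)) (b :: r) =
            b :: List.takeWhile (fun b => !(b == 0)) r := by
          simp [hb]
        rw [h2]
        have hc' : r.contains 0 = true := by simpa using hm
        unfold truncZero at ih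
        rw [if_pos hc', hk] at ih
        simpa using ih
      · have hnone := (PySem.List.index?_eq_none_iff r 0).mpr hm
        have hc : (b :: r).contains 0 = false := by
          simp [hm]
          omega
        rw [hc]
        simp only [Bool.false_eq_true, if_false]
        have h2 : List.takeWhile (fun b => !(b == 0)) (b :: r) =
            b :: List.takeWhile (fun b => !(b == 0)) r := by
          simp [hb]
        rw [h2]
        have hc' : r.contains 0 = false := by simpa using hm
        unfold truncZero at ih
        rw [hc'] at ih
        simp only [Bool.false_eq_true, if_false] at ih
        exact congrArg (fun t => b :: t) ih

theorem map_singleton_flatten {α β : Type} (f : α → β) (l : List α) :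
    (l.map (fun x => [f x])).flatten = l.map f := by
  induction l with
  | nil => rfl
  | cons a r ih => simp [ih]

theorem chunkLoop_flatten (m : List Int) :
    (chunkLoop m).flatten = (m.map stepB).flatten := by
  induction m using chunkLoop.induct with
  | case1 => simp [chunkLoop]
  | case2 b rest h ih =>
    rw [chunkLoop]
    simp only [h, if_pos]
    have hsplit : (b :: rest).takeWhile asciiB ++ (b :: rest).dropWhile asciiB = b :: rest :=
      List.takeWhile_append_dropWhile
    calc ((((b :: rest).takeWhile asciiB).map (fun x => Char.ofNat x.toNat))
            :: chunkLoop ((b :: rest).dropWhile asciiB)).flatten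
        = ((b :: rest).takeWhile asciiB).map (fun x => Char.ofNat x.toNat)
            ++ (chunkLoop ((b :: rest).dropWhile asciiB)).flatten := by simp
      _ = ((((b :: rest).takeWhile asciiB).map stepB)).flatten
            ++ ((((b :: rest).dropWhile asciiB).map stepB)).flatten := by
            rw [ih]
            congr 1
            rw [← map_singleton_flatten (fun x => Char.ofNat x.toNat) ((b :: rest).takeWhile asciiB)]
            congr 1
            apply List.map_congr_left
            intro x hx
            have : asciiB x = true := List.mem_takeWhile_imp hx
            simp [stepB, this]
      _ = ((b :: rest).map stepB).flatten := by
            rw [← List.flatten_append, ← List.map_append, hsplit]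
  | case3 b rest h ih =>
    rw [chunkLoop]
    simp only [h]
    simp only [Bool.false_eq_true, if_false, List.flatten_cons, List.map_cons]
    rw [ih]
    have : stepB b = specialB b := by simp [stepB, h]
    rw [this]

theorem join_eq_flatten (pieces : List (List Char)) :
    PySem.Chars.join [] pieces = pieces.flatten := by
  induction pieces with
  | nil => rfl
  | cons p r ih =>
    cases r with
    | nil => simp [PySem.Chars.join_singleton]
    | cons q s =>
      rw [PySem.Chars.join_cons_cons]
      simp only [List.flatten_cons]
      rw [ih]; simp

-- ===== VERDICT (by name: the statement is the Claim_ definition above) =====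
theorem decode_ct_text_spec : Claim_equal_decode_ct_text := by
  intro l _
  unfold Spec_decode_ct_text decode_ct_text decode_ct_text_alt
  by_cases hl : l = []
  · subst hl
    rw [if_pos rfl]
    have h1 : truncZero [] = [] := rfl
    have h2 : chunkLoop [] = [] := by simp [chunkLoop]
    rw [h1, h2]
    rfl
  · rw [if_neg hl, truncZero_eq, join_eq_flatten, join_eq_flatten, chunkLoop_flatten,
        decodeCTLoop_eq]
    congr 2
    apply List.map_congr_left
    intro x _
    exact stepA_eq_stepB x
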